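-- pv_equiv track=rewrite | github.com/Bobmarlinjr/adventofcode | Day 9/Day9.py | compact_data
-- ===== SOURCE A (Python) =====
-- def compact_data(data, max_write):
--     writer = 0
--     reader = max_write
--     while True:
--         while writer in data:
--             writer += 1
--         while reader not in data:
--             reader -= 1
--         if reader <= writer:
--             break
--         data[writer] = data[reader]
--         del data[reader]
--     return data
-- ===== SOURCE B (Python) =====
-- def compact_data(data, max_write):
--     # Note: A compacts `data` in place and returns it; B builds a fresh dict
--     # with the same contents (return-value equivalence only).
--     asc = sorted(k for k in data if k >= 0)          # occupied non-negative slots, ascending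
--     readers = sorted((k for k in data if k <= max_write), reverse=True)
--     deleted = set()
--     moves = []
--     g = 0          # candidate gap position
--     j = 0          # index into asc: everything before j is known to be < g
--     for r in readers:
--         while j < len(asc) and asc[j] <= g:
--             if asc[j] == g:
--                 g += 1
--             j += 1
--         if r <= g:
--             break
--         moves.append((g, data[r]))
--         deleted.add(r)
--         g += 1
--     out = {k: v for k, v in data.items() if k not in deleted}
--     out.update(moves)
--     return out
-- ===== Notes on version B (the rewrite author's own statement) =====
-- stated objective: alternative
-- what changed: A repeatedly scans integer positions one by one (upward for the next gap, downward for the next occupied slot) against the live dict; B sorts the occupied keys once and runs a single two-pointer pass pairing ascending gaps with descending readers, building the result dict in one go (A also compacts its argument in place, B returns a fresh dict).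
-- outside the precondition, e.g. on compact_data({5: 1}, 2): A does not finish within the time limit, B returns {5: 1}
import Mathlib
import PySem

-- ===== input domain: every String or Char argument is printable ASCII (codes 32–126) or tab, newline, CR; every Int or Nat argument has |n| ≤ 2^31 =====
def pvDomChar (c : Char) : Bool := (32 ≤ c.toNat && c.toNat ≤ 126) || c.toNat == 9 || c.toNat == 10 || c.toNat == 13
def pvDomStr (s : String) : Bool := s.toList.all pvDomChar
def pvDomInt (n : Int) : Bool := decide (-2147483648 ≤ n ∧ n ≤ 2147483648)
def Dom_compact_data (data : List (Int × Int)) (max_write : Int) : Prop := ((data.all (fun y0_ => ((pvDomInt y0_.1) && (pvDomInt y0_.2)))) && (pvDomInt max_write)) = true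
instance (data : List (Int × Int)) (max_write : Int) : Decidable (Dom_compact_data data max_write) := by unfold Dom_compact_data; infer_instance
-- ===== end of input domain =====

-- B replaces A's index-by-index scans over every integer position with a sort of the
-- occupied slots and a single two-pointer pass (gaps ascending vs. readers descending);
-- A also compacts its dict argument in place and returns it, B builds a fresh dict —
-- the equivalence proved here is about the return value only.

-- ===== PORT A =====
-- `while writer in data: writer += 1`; the fuel argument only makes the scan total
-- (a dict has finitely many keys, so d.size + 1 steps always suffice).
def pvWriterScan (d : PySem.Dict Int Int) (w : Int) : Nat → Int
  | 0 => w
  | fuel+1 => if d.contains w then pvWriterScan d (w+1) fuel else w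

-- `while reader not in data: reader -= 1`; the fuel only makes the scan total: it is
-- exhausted exactly when the Python loop diverges (no key ≤ reader), excluded by Pre_.
def pvReaderScan (d : PySem.Dict Int Int) (r : Int) : Nat → Int
  | 0 => r
  | fuel+1 => if d.contains r then r else pvReaderScan d (r-1) fuel

def pvReadFuel (d : PySem.Dict Int Int) (r : Int) : Nat :=
  match d.keys.min? with
  | none => 0
  | some m => (r - m + 1).toNat

-- the `while True` loop; each non-breaking pass deletes one key, so data.length + 1
-- passes always suffice (the fuel is a totality guard only).
def pvLoopA (d : PySem.Dict Int Int) (w r : Int) : Nat → PySem.Dict Int Int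
  | 0 => d
  | fuel+1 =>
    let w' := pvWriterScan d w (d.size + 1)
    let r' := pvReaderScan d r (pvReadFuel d r)
    if r' ≤ w' then d
    -- `data[writer] = data[reader]; del data[reader]` (reader is a key here, so getD's default is unused)
    else pvLoopA ((d.insert w' (d.getD r' 0)).erase r') w' r' fuel

def compact_data (data : List (Int × Int)) (max_write : Int) : List (Int × Int) :=
  (pvLoopA (PySem.Dict.mk data) 0 max_write (data.length + 1)).items

-- ===== PORT B =====
-- the `while j < len(asc) and asc[j] <= g` loop, as structural recursion on the suffix asc[j:]
def pvNextGap : List Int → Int → Int × List Int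
  | [], g => (g, [])
  | a :: rest, g =>
    if a ≤ g then (if a = g then pvNextGap rest (g+1) else pvNextGap rest g)
    else (g, a :: rest)

-- `for r in readers: …` with its early break, carrying (asc suffix, g, deleted, moves)
def pvLoopB (d : PySem.Dict Int Int) : List Int → List Int → Int → PySem.Set Int → List (Int × Int) → PySem.Set Int × List (Int × Int)
  | [], _, _, deleted, moves => (deleted, moves)
  | r :: rs, asc, g, deleted, moves =>
    let p := pvNextGap asc g
    if r ≤ p.1 then (deleted, moves)
    -- `moves.append((g, data[r]))` (r is a key of data here, so getD's default is unused)
    else pvLoopB d rs p.2 (p.1 + 1) (PySem.Set.add deleted r) (moves ++ [(p.1, d.getD r 0)])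

def compact_data_alt (data : List (Int × Int)) (max_write : Int) : List (Int × Int) :=
  let d := PySem.Dict.mk data
  let asc := PySem.List.sorted (d.keys.filter (fun k => decide (0 ≤ k))) (fun k => k)
  let readers := PySem.List.sorted (d.keys.filter (fun k => decide (k ≤ max_write))) (fun k => k) true
  let res := pvLoopB d readers asc 0 PySem.Set.empty []
  ((PySem.Dict.ofList (data.filter (fun p => !(PySem.Set.contains res.1 p.1)))).update res.2).items

-- ===== PRECONDITION & SPEC =====
-- Pre_ excludes (a) association lists that repeat a key — they do not represent a Python
-- dict, which is A's input type — and (b) inputs with no key ≤ max_write, on which A's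
-- `while reader not in data` loop never terminates (A returns no value there).
def Pre_compact_data (data : List (Int × Int)) (max_write : Int) : Prop :=
  (data.map Prod.fst).Nodup ∧ ∃ p ∈ data, p.1 ≤ max_write
instance (data : List (Int × Int)) (max_write : Int) : Decidable (Pre_compact_data data max_write) := by unfold Pre_compact_data; infer_instance

def pvWitness_compact_data : (List (Int × Int)) × Int := ([(0, 7), (3, 9), (5, 2)], 6)

def Spec_compact_data (data : List (Int × Int)) (max_write : Int) (out : List (Int × Int)) : Prop := out = compact_data_alt data max_write
instance (data : List (Int × Int)) (max_write : Int) (out : List (Int × Int)) : Decidable (Spec_compact_data data max_write out) := by unfold Spec_compact_data; infer_instance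

-- ===== CLAIM (what is proved, stated in full; the proofs are below) =====
def Claim_equal_compact_data : Prop := ∀ (data : List (Int × Int)) (max_write : Int), Dom_compact_data data max_write → Pre_compact_data data max_write → Spec_compact_data data max_write (compact_data data max_write)

-- ===== LEMMAS AND PROOFS =====

theorem pv_ws_ge (d : PySem.Dict Int Int) (fuel : Nat) : ∀ (w : Int), w ≤ pvWriterScan d w fuel := by
  induction fuel with
  | zero => intro w; simp [pvWriterScan]
  | succ n ih =>
    intro w
    simp only [pvWriterScan]
    split
    · exact le_trans (by omega) (ih (w+1))
    · exact le_refl w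

theorem pv_ws_run (d : PySem.Dict Int Int) (fuel : Nat) : ∀ (w j : Int), w ≤ j → j < pvWriterScan d w fuel → d.contains j = true := by
  induction fuel with
  | zero => intro w j h1 h2; simp [pvWriterScan] at h2; omega
  | succ n ih =>
    intro w j h1 h2
    simp only [pvWriterScan] at h2
    by_cases hc : d.contains w = true
    · simp only [hc, if_true] at h2
      by_cases heq : j = w
      · exact heq ▸ hc
      · exact ih (w+1) j (by omega) h2
    · rw [if_neg hc] at h2; omega

theorem pv_ws_stop (d : PySem.Dict Int Int) (fuel : Nat) : ∀ (w : Int), pvWriterScan d w fuel = w + fuel ∨ d.contains (pvWriterScan d w fuel) = false := by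
  induction fuel with
  | zero => intro w; left; simp [pvWriterScan]
  | succ n ih =>
    intro w
    simp only [pvWriterScan]
    by_cases hc : d.contains w = true
    · simp only [hc, if_true]
      rcases ih (w+1) with h | h
      · left; push_cast; omega
      · right; exact h
    · simp only [hc, if_false]
      right; simpa using hc

theorem pv_rs_le (d : PySem.Dict Int Int) (fuel : Nat) : ∀ (r : Int), pvReaderScan d r fuel ≤ r := by
  induction fuel with
  | zero => intro r; simp [pvReaderScan]
  | succ n ih =>
    intro r
    simp only [pvReaderScan]
    split
    · exact le_refl r
    · exact le_trans (ih (r-1)) (by omega)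

theorem pv_rs_run (d : PySem.Dict Int Int) (fuel : Nat) : ∀ (r j : Int), pvReaderScan d r fuel < j → j ≤ r → d.contains j = false := by
  induction fuel with
  | zero => intro r j h1 h2; simp [pvReaderScan] at h1; omega
  | succ n ih =>
    intro r j h1 h2
    simp only [pvReaderScan] at h1
    by_cases hc : d.contains r = true
    · simp only [hc, if_true] at h1; omega
    · simp only [hc, if_false] at h1
      rcases eq_or_lt_of_le h2 with h | h
      · subst h; simpa using hc
      · exact ih (r-1) j h1 (by omega)

theorem pv_rs_stop (d : PySem.Dict Int Int) (fuel : Nat) : ∀ (r : Int), pvReaderScan d r fuel = r - fuel ∨ d.contains (pvReaderScan d r fuel) = true := by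
  induction fuel with
  | zero => intro r; left; simp [pvReaderScan]
  | succ n ih =>
    intro r
    simp only [pvReaderScan]
    by_cases hc : d.contains r = true
    · refine Or.inr ?_; simp [hc]
    · simp only [hc, if_false]
      rcases ih (r-1) with h | h
      · left; push_cast; omega
      · right; exact h

-- keys are finitely many, so the writer scan with d.size + 1 fuel lands on a non-key
theorem pv_writer_result (d : PySem.Dict Int Int) (hnd : d.keys.Nodup) (w : Int) :
    w ≤ pvWriterScan d w (d.size + 1) ∧ d.contains (pvWriterScan d w (d.size + 1)) = false ∧
      (∀ j, w ≤ j → j < pvWriterScan d w (d.size + 1) → d.contains j = true) := by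
  refine ⟨pv_ws_ge d _ w, ?_, fun j h1 h2 => pv_ws_run d _ w j h1 h2⟩
  rcases pv_ws_stop d (d.size + 1) w with h | h
  · exfalso
    have hsub : PySem.List.pyRange w (w + (d.size + 1)) 1 ⊆ d.keys := by
      intro j hj
      rw [PySem.List.mem_pyRange_one] at hj
      have := pv_ws_run d (d.size + 1) w j hj.1 (by omega)
      rwa [PySem.Dict.contains_iff_mem_keys] at this
    have hlen := (List.subperm_of_subset (PySem.List.nodup_pyRange_one _ _) hsub).length_le
    rw [PySem.List.length_pyRange_one] at hlen
    have : d.keys.length = d.size := by simp [PySem.Dict.keys, PySem.Dict.size]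
    omega
  · exact h

-- the reader scan finds any ρ that is a key with no keys in (ρ, r]
theorem pv_reader_result (d : PySem.Dict Int Int) (r ρ : Int) (h1 : d.contains ρ = true)
    (h2 : ρ ≤ r) (h3 : ∀ j, ρ < j → j ≤ r → d.contains j = false) :
    pvReaderScan d r (pvReadFuel d r) = ρ := by
  have hρk : ρ ∈ d.keys := (PySem.Dict.contains_iff_mem_keys d ρ).mp h1
  obtain ⟨m, hm, hmρ⟩ : ∃ m, d.keys.min? = some m ∧ m ≤ ρ := by
    cases hm : d.keys.min? with
    | none => exact absurd (List.min?_eq_none_iff.mp hm) (List.ne_nil_of_mem hρk)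
    | some m => exact ⟨m, rfl, ((List.min?_eq_some_iff).mp hm).2 ρ hρk⟩
  have hfuel : r - ρ < (pvReadFuel d r : Int) := by
    have hfe : pvReadFuel d r = (r - m + 1).toNat := by unfold pvReadFuel; rw [hm]
    rw [hfe]
    omega
  have hle := pv_rs_le d (pvReadFuel d r) r
  rcases pv_rs_stop d (pvReadFuel d r) r with h | h
  · exfalso
    have : d.contains ρ = false := pv_rs_run d (pvReadFuel d r) r ρ (by omega) h2
    rw [h1] at this; simp at this
  · by_cases hlt : pvReaderScan d r (pvReadFuel d r) < ρ
    · exfalso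
      have : d.contains ρ = false := pv_rs_run d (pvReadFuel d r) r ρ hlt h2
      rw [h1] at this; simp at this
    · by_cases hgt : ρ < pvReaderScan d r (pvReadFuel d r)
      · exfalso
        have := h3 _ hgt hle
        rw [h] at this; simp at this
      · omega

-- the inner while-loop of B finds the least non-key ≥ g among the non-negative slots
theorem pv_nextGap_spec (K' : List Int) : ∀ (asc : List Int) (g : Int),
    asc.Pairwise (· < ·) → (∀ k ∈ asc, k ∈ K' ∧ 0 ≤ k) → (∀ k ∈ K', 0 ≤ k → g ≤ k → k ∈ asc) → 0 ≤ g →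
    g ≤ (pvNextGap asc g).1 ∧ (pvNextGap asc g).1 ∉ K' ∧
      (∀ j, g ≤ j → j < (pvNextGap asc g).1 → j ∈ K') ∧
      (pvNextGap asc g).2.Pairwise (· < ·) ∧ (∀ k ∈ (pvNextGap asc g).2, k ∈ K' ∧ 0 ≤ k) ∧
      (∀ k ∈ K', 0 ≤ k → (pvNextGap asc g).1 < k → k ∈ (pvNextGap asc g).2) := by
  intro asc
  induction asc with
  | nil =>
    intro g hp hsub hcov hg
    refine ⟨le_refl g, ?_, ?_, List.Pairwise.nil, ?_, ?_⟩
    · intro hgK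
      exact absurd (hcov g hgK hg (le_refl g)) (List.not_mem_nil)
    · intro j h1 h2
      simp [pvNextGap] at h1 h2
      omega
    · intro k hk; exact absurd hk (List.not_mem_nil)
    · intro k hk hk0 hlt
      exact hcov k hk hk0 (le_of_lt (by simpa [pvNextGap] using hlt))
  | cons a rest ih =>
    intro g hp hsub hcov hg
    obtain ⟨hall, hprest⟩ := List.pairwise_cons.mp hp
    by_cases ha : a ≤ g
    · have hrec : ∀ g' : Int, pvNextGap (a :: rest) g = pvNextGap rest g' →
          (∀ k ∈ K', 0 ≤ k → g' ≤ k → k ∈ rest) → g ≤ g' → 0 ≤ g' → g' ≤ g + 1 → (g' = g + 1 → g ∈ K') →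
          g ≤ (pvNextGap (a :: rest) g).1 ∧ (pvNextGap (a :: rest) g).1 ∉ K' ∧
            (∀ j, g ≤ j → j < (pvNextGap (a :: rest) g).1 → j ∈ K') ∧
            (pvNextGap (a :: rest) g).2.Pairwise (· < ·) ∧
            (∀ k ∈ (pvNextGap (a :: rest) g).2, k ∈ K' ∧ 0 ≤ k) ∧
            (∀ k ∈ K', 0 ≤ k → (pvNextGap (a :: rest) g).1 < k → k ∈ (pvNextGap (a :: rest) g).2) := by
        intro g' heq hcov' hgg' hg0' hgle hgK'
        obtain ⟨r1, r2, r3, r4, r5, r6⟩ :=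
          ih g' hprest (fun k hk => hsub k (List.mem_cons_of_mem a hk)) hcov' hg0'
        rw [heq]
        refine ⟨le_trans hgg' r1, r2, ?_, r4, r5, r6⟩
        intro j h1 h2
        by_cases hj : g' ≤ j
        · exact r3 j hj h2
        · have hjg : j = g ∧ g' = g + 1 := by omega
          rw [hjg.1]
          exact hgK' hjg.2
      by_cases hae : a = g
      · refine hrec (g+1) (by simp [pvNextGap, ha, hae]) ?_ (by omega) (by omega) (by omega)
          (fun _ => hae ▸ (hsub a List.mem_cons_self).1)
        intro k hk hk0 hgk
        rcases List.mem_cons.mp (hcov k hk hk0 (by omega)) with h | h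
        · omega
        · exact h
      · refine hrec g (by simp [pvNextGap, ha, hae]) ?_ (le_refl g) hg (by omega)
          (fun h => absurd h (by omega))
        intro k hk hk0 hgk
        rcases List.mem_cons.mp (hcov k hk hk0 hgk) with h | h
        · omega
        · exact h
    · have heq : pvNextGap (a :: rest) g = (g, a :: rest) := by simp [pvNextGap, ha]
      rw [heq]
      refine ⟨le_refl g, ?_, ?_, hp, hsub, ?_⟩
      · intro hgK
        rcases List.mem_cons.mp (hcov g hgK hg (le_refl g)) with h | h
        · omega
        · exact absurd (hall g h) (by omega)
      · intro j h1 h2; omega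
      · intro k hk hk0 hlt
        exact hcov k hk hk0 (le_of_lt hlt)

theorem pv_contains_state (L : List (Int × Int)) (del : PySem.Set Int) (mv : List (Int × Int)) (j : Int) :
    (PySem.Dict.mk (L.filter (fun p => !(PySem.Set.contains del p.1)) ++ mv)).contains j = true ↔
      ((j ∈ L.map Prod.fst ∧ j ∉ del) ∨ j ∈ mv.map Prod.fst) := by
  rw [PySem.Dict.contains_iff_mem_keys]
  simp only [PySem.Dict.keys_mk, List.map_append, List.mem_append, List.mem_map, List.mem_filter]
  constructor
  · rintro (⟨p, ⟨hpL, hpc⟩, rfl⟩ | h)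
    · exact Or.inl ⟨⟨p, hpL, rfl⟩, by simpa using hpc⟩
    · exact Or.inr h
  · rintro (⟨⟨p, hpL, rfl⟩, hnd⟩ | h)
    · exact Or.inl ⟨p, ⟨hpL, by simpa using hnd⟩, rfl⟩
    · exact Or.inr h

theorem pv_bfalse (b : Bool) (h : ¬ b = true) : b = false := by
  cases b
  · rfl
  · exact absurd rfl h

theorem pv_state_nodup (L : List (Int × Int)) (del : PySem.Set Int) (mv : List (Int × Int))
    (hK : (L.map Prod.fst).Nodup) (hmvnK : ∀ q ∈ mv, q.1 ∉ L.map Prod.fst)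
    (hmvnd : (mv.map Prod.fst).Nodup) :
    (PySem.Dict.mk (L.filter (fun p => !(PySem.Set.contains del p.1)) ++ mv)).keys.Nodup := by
  simp only [PySem.Dict.keys_mk, List.map_append]
  rw [List.nodup_append]
  refine ⟨hK.sublist ((List.filter_sublist).map Prod.fst), hmvnd, ?_⟩
  intro x hx y hy hxy
  obtain ⟨p, hp, rfl⟩ := List.mem_map.mp hx
  obtain ⟨q, hq, hqe⟩ := List.mem_map.mp hy
  exact hmvnK q hq ((hxy ▸ hqe) ▸ List.mem_map_of_mem (List.mem_of_mem_filter hp))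

theorem pv_getD_state (L : List (Int × Int)) (del : PySem.Set Int) (mv : List (Int × Int))
    (hK : (L.map Prod.fst).Nodup) (hmvnK : ∀ q ∈ mv, q.1 ∉ L.map Prod.fst)
    (hmvnd : (mv.map Prod.fst).Nodup) (j : Int) (hjK : j ∈ L.map Prod.fst) (hjdel : j ∉ del) :
    (PySem.Dict.mk (L.filter (fun p => !(PySem.Set.contains del p.1)) ++ mv)).getD j 0
      = (PySem.Dict.mk L).getD j 0 := by
  obtain ⟨p, hpL, hp1⟩ := List.mem_map.mp hjK
  have h1 : (PySem.Dict.mk L).getD j 0 = p.2 := by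
    refine PySem.Dict.getD_of_mem_items _ ?_ (by simpa using hK) 0
    show (j, p.2) ∈ L
    rw [← hp1]
    exact hpL
  have h2 : (PySem.Dict.mk (L.filter (fun p => !(PySem.Set.contains del p.1)) ++ mv)).getD j 0 = p.2 := by
    refine PySem.Dict.getD_of_mem_items _ ?_ (pv_state_nodup L del mv hK hmvnK hmvnd) 0
    show (j, p.2) ∈ L.filter (fun p => !(PySem.Set.contains del p.1)) ++ mv
    refine List.mem_append_left _ (List.mem_filter.mpr ⟨?_, ?_⟩)
    · show (j, p.2) ∈ L
      rw [← hp1]; exact hpL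
    · simpa [hp1] using hjdel
  rw [h1, h2]

-- the master simulation: A's while-loop, started in the state reached after the moves
-- recorded in (del, mv), computes exactly what B's two-pointer loop computes
theorem pv_master (L : List (Int × Int)) (mw : Int) (hK : (L.map Prod.fst).Nodup) :
    ∀ (rs : List Int) (fuel : Nat) (g : Int) (asc : List Int) (del : PySem.Set Int) (mv : List (Int × Int)) (w r : Int),
    rs.length < fuel →
    (∀ x ∈ del, r ≤ x ∧ x ∈ L.map Prod.fst ∧ x ≤ mw) →
    (del = [] → r = mw) →
    (del ≠ [] → r ∈ del) →
    asc.Pairwise (· < ·) →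
    (∀ k ∈ asc, k ∈ L.map Prod.fst ∧ 0 ≤ k) →
    (∀ k ∈ L.map Prod.fst, 0 ≤ k → g ≤ k → k ∈ asc) →
    0 ≤ g →
    0 ≤ w → w ≤ g →
    (∀ q ∈ mv, 0 ≤ q.1 ∧ q.1 < g) →
    (∀ q ∈ mv, q.1 ∉ L.map Prod.fst) →
    (mv.map Prod.fst).Nodup →
    (∀ j : Int, 0 ≤ j → j < g → j ∈ L.map Prod.fst ∨ j ∈ mv.map Prod.fst) →
    (mv ≠ [] → (g - 1) ∈ mv.map Prod.fst) →
    (del ≠ [] → g ≤ r) →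
    (mv = [] ↔ del = []) →
    (mv = [] → g = 0) →
    rs.Pairwise (· > ·) →
    (∀ k : Int, k ∈ rs ↔ k ∈ L.map Prod.fst ∧ k ≤ mw ∧ k ≤ r ∧ k ∉ del) →
    (rs ≠ [] ∨ mv ≠ []) →
    (∀ q ∈ (pvLoopB (PySem.Dict.mk L) rs asc g del mv).2, q.1 ∉ L.map Prod.fst) ∧
    ((pvLoopB (PySem.Dict.mk L) rs asc g del mv).2.map Prod.fst).Nodup ∧
    (pvLoopA (PySem.Dict.mk (L.filter (fun p => !(PySem.Set.contains del p.1)) ++ mv)) w r fuel).items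
      = L.filter (fun p => !(PySem.Set.contains (pvLoopB (PySem.Dict.mk L) rs asc g del mv).1 p.1))
        ++ (pvLoopB (PySem.Dict.mk L) rs asc g del mv).2 := by
  intro rs
  induction rs with
  | nil =>
    intro fuel g asc del mv w r hfuel hdel hdelr hrin hascp hascsub hasccov hg0 hw0 hwg hmvlt hmvnK hmvnd hcov hlast hgr hmvdel hginit hrsp hrsmem hne
    have hmvne : mv ≠ [] := by
      rcases hne with h | h
      · exact absurd rfl h
      · exact h
    have hdelne : del ≠ [] := fun h => hmvne (hmvdel.mpr h)
    have hgrr : g ≤ r := hgr hdelne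
    have hrdel : r ∈ del := hrin hdelne
    have hrmw : r ≤ mw := (hdel r hrdel).2.2
    simp only [pvLoopB]
    refine ⟨hmvnK, hmvnd, ?_⟩
    obtain ⟨fuel', rfl⟩ : ∃ f, fuel = f + 1 := ⟨fuel - 1, by omega⟩
    set d := PySem.Dict.mk (L.filter (fun p => !(PySem.Set.contains del p.1)) ++ mv) with hd
    have hmem := pv_contains_state L del mv
    have hnd : d.keys.Nodup := pv_state_nodup L del mv hK hmvnK hmvnd
    obtain ⟨hwge, hwfalse, hwrun⟩ := pv_writer_result d hnd w
    have hrr : pvReaderScan d r (pvReadFuel d r) = g - 1 := by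
      refine pv_reader_result d r (g-1) ((hmem (g-1)).mpr (Or.inr (hlast hmvne))) (by omega) ?_
      intro j h1 h2
      refine pv_bfalse _ (fun hc => ?_)
      rcases (hmem j).mp hc with ⟨hjK, hjdel⟩ | hjmv
      · exact absurd ((hrsmem j).mpr ⟨hjK, by omega, h2, hjdel⟩) (List.not_mem_nil)
      · obtain ⟨q, hq, hq1⟩ := List.mem_map.mp hjmv
        have := (hmvlt q hq).2
        omega
    have hwge' : g - 1 ≤ pvWriterScan d w (d.size + 1) := by
      by_contra hlt
      push_neg at hlt
      have hin : d.contains (pvWriterScan d w (d.size + 1)) = true := by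
        refine (hmem _).mpr ?_
        rcases hcov (pvWriterScan d w (d.size + 1)) (by omega) (by omega) with h | h
        · refine Or.inl ⟨h, fun hdd => ?_⟩
          have := (hdel _ hdd).1
          omega
        · exact Or.inr h
      rw [hwfalse] at hin
      exact absurd hin (by simp)
    simp only [pvLoopA]
    rw [hrr, if_pos hwge']
  | cons r1 rs' ih =>
    intro fuel g asc del mv w r hfuel hdel hdelr hrin hascp hascsub hasccov hg0 hw0 hwg hmvlt hmvnK hmvnd hcov hlast hgr hmvdel hginit hrsp hrsmem hne
    obtain ⟨fuel', rfl⟩ : ∃ f, fuel = f + 1 := ⟨fuel - 1, by omega⟩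
    obtain ⟨hrall, hrsp'⟩ := List.pairwise_cons.mp hrsp
    obtain ⟨hr1K, hr1mw, hr1r, hr1del⟩ := (hrsmem r1).mp List.mem_cons_self
    have hrmw : r ≤ mw := by
      by_cases hdele : del = []
      · rw [hdelr hdele]
      · exact (hdel r (hrin hdele)).2.2
    obtain ⟨hgapge, hgapnK, hgapcov, hgapp, hgapsub, hgapcov'⟩ :=
      pv_nextGap_spec (L.map Prod.fst) asc g hascp hascsub hasccov hg0
    set g' := (pvNextGap asc g).1 with hg'
    set d := PySem.Dict.mk (L.filter (fun p => !(PySem.Set.contains del p.1)) ++ mv) with hd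
    have hmem := pv_contains_state L del mv
    have hnd : d.keys.Nodup := pv_state_nodup L del mv hK hmvnK hmvnd
    obtain ⟨hwge, hwfalse, hwrun⟩ := pv_writer_result d hnd w
    have hdelge : ∀ x ∈ del, r ≤ x := fun x hx => (hdel x hx).1
    have hocc : ∀ j : Int, 0 ≤ j → j < g → d.contains j = true := by
      intro j h1 h2
      refine (hmem j).mpr ?_
      rcases hcov j h1 h2 with h | h
      · refine Or.inl ⟨h, fun hdd => ?_⟩
        have hgler : g ≤ r := by
          have hne2 : mv ≠ [] := by
            intro hh; have := hginit hh; omega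
          exact hgr (fun hh => hne2 (hmvdel.mpr hh))
        have := hdelge j hdd
        omega
      · exact Or.inr h
    have hocc2 : ∀ j : Int, g ≤ j → j < g' → j < r → d.contains j = true := by
      intro j h1 h2 h3
      refine (hmem j).mpr (Or.inl ⟨hgapcov j h1 h2, fun hdd => ?_⟩)
      have := hdelge j hdd
      omega
    by_cases hbr : r1 ≤ g'
    · -- B breaks here, and so does A
      have hBeq : pvLoopB (PySem.Dict.mk L) (r1 :: rs') asc g del mv = (del, mv) := by
        simp only [pvLoopB]
        rw [← hg', if_pos hbr]
      rw [hBeq]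
      refine ⟨hmvnK, hmvnd, ?_⟩
      have hrr : pvReaderScan d r (pvReadFuel d r) ≤ pvWriterScan d w (d.size + 1) := by
        by_cases hmve : mv = []
        · have hdele : del = [] := hmvdel.mp hmve
          have hgz : g = 0 := hginit hmve
          have hrr1 : pvReaderScan d r (pvReadFuel d r) = r1 := by
            refine pv_reader_result d r r1 ((hmem r1).mpr (Or.inl ⟨hr1K, hr1del⟩)) hr1r ?_
            intro j h1 h2
            refine pv_bfalse _ (fun hc => ?_)
            rcases (hmem j).mp hc with ⟨hjK, hjdel⟩ | hjmv
            · rcases List.mem_cons.mp ((hrsmem j).mpr ⟨hjK, by omega, h2, hjdel⟩) with h | h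
              · omega
              · have := hrall j h; omega
            · rw [hmve] at hjmv; simp at hjmv
          rw [hrr1]
          by_contra hlt
          push_neg at hlt
          have hcc : d.contains (pvWriterScan d w (d.size+1)) = true :=
            hocc2 _ (by omega) (by omega) (by omega)
          rw [hwfalse] at hcc
          exact absurd hcc (by simp)
        · have hdelne : del ≠ [] := fun h => hmve (hmvdel.mpr h)
          have hgler : g ≤ r := hgr hdelne
          have hrun2 : ∀ j, max r1 (g-1) < j → j ≤ r → d.contains j = false := by
            intro j h1 h2
            refine pv_bfalse _ (fun hc => ?_)
            rcases (hmem j).mp hc with ⟨hjK, hjdel⟩ | hjmv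
            · rcases List.mem_cons.mp ((hrsmem j).mpr ⟨hjK, by omega, h2, hjdel⟩) with h | h
              · simp at h1; omega
              · have := hrall j h; simp at h1; omega
            · obtain ⟨q, hq, hq1⟩ := List.mem_map.mp hjmv
              have := (hmvlt q hq).2
              simp at h1
              omega
          by_cases hcase : g - 1 < r1
          · have hrr1 : pvReaderScan d r (pvReadFuel d r) = r1 :=
              pv_reader_result d r r1 ((hmem r1).mpr (Or.inl ⟨hr1K, hr1del⟩)) hr1r
                (fun j h1 h2 => hrun2 j (by simp; omega) h2)
            rw [hrr1]
            by_contra hlt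
            push_neg at hlt
            have hcc : d.contains (pvWriterScan d w (d.size+1)) = true := by
              by_cases hwg2 : pvWriterScan d w (d.size+1) < g
              · exact hocc _ (by omega) hwg2
              · exact hocc2 _ (by omega) (by omega) (by omega)
            rw [hwfalse] at hcc
            exact absurd hcc (by simp)
          · have hrr1 : pvReaderScan d r (pvReadFuel d r) = g - 1 :=
              pv_reader_result d r (g-1) ((hmem (g-1)).mpr (Or.inr (hlast hmve))) (by omega)
                (fun j h1 h2 => hrun2 j (by simp; omega) h2)
            rw [hrr1]
            by_contra hlt
            push_neg at hlt
            have hcc : d.contains (pvWriterScan d w (d.size+1)) = true :=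
              hocc _ (by omega) (by omega)
            rw [hwfalse] at hcc
            exact absurd hcc (by simp)
      simp only [pvLoopA]
      rw [if_pos hrr]
    · push_neg at hbr
      have hrr1 : pvReaderScan d r (pvReadFuel d r) = r1 := by
        refine pv_reader_result d r r1 ((hmem r1).mpr (Or.inl ⟨hr1K, hr1del⟩)) hr1r ?_
        intro j h1 h2
        refine pv_bfalse _ (fun hc => ?_)
        rcases (hmem j).mp hc with ⟨hjK, hjdel⟩ | hjmv
        · rcases List.mem_cons.mp ((hrsmem j).mpr ⟨hjK, by omega, h2, hjdel⟩) with h | h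
          · omega
          · have := hrall j h; omega
        · obtain ⟨q, hq, hq1⟩ := List.mem_map.mp hjmv
          have := (hmvlt q hq).2
          omega
      have hww : pvWriterScan d w (d.size + 1) = g' := by
        have hle1 : pvWriterScan d w (d.size + 1) ≤ g' := by
          by_contra hlt
          push_neg at hlt
          have hcc := hwrun g' (by omega) hlt
          rcases (hmem g').mp hcc with ⟨hjK, _⟩ | hjmv
          · exact absurd hjK hgapnK
          · obtain ⟨q, hq, hq1⟩ := List.mem_map.mp hjmv
            have := (hmvlt q hq).2
            omega
        by_contra hne2
        have hlt : pvWriterScan d w (d.size+1) < g' := by omega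
        have hcc : d.contains (pvWriterScan d w (d.size+1)) = true := by
          by_cases hwg2 : pvWriterScan d w (d.size+1) < g
          · exact hocc _ (by omega) hwg2
          · exact hocc2 _ (by omega) (by omega) (by omega)
        rw [hwfalse] at hcc
        exact absurd hcc (by simp)
      have hval : d.getD r1 0 = (PySem.Dict.mk L).getD r1 0 :=
        pv_getD_state L del mv hK hmvnK hmvnd r1 hr1K hr1del
      have hg'false : d.contains g' = false := by
        refine pv_bfalse _ (fun hc => ?_)
        rcases (hmem g').mp hc with ⟨hjK, _⟩ | hjmv
        · exact absurd hjK hgapnK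
        · obtain ⟨q, hq, hq1⟩ := List.mem_map.mp hjmv
          have := (hmvlt q hq).2
          omega
      have hstate : (d.insert g' (d.getD r1 0)).erase r1
          = PySem.Dict.mk (L.filter (fun p => !(PySem.Set.contains (PySem.Set.add del r1) p.1))
              ++ (mv ++ [(g', (PySem.Dict.mk L).getD r1 0)])) := by
        apply PySem.Dict.ext
        rw [hval]
        show ((d.insert g' ((PySem.Dict.mk L).getD r1 0)).items).filter (fun p => !(p.1 == r1)) = _
        rw [PySem.Dict.items_insert_of_not_contains _ _ hg'false]
        show ((L.filter (fun p => !(PySem.Set.contains del p.1)) ++ mv) ++ [(g', (PySem.Dict.mk L).getD r1 0)]).filter (fun p => !(p.1 == r1)) = _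
        rw [List.filter_append, List.filter_append, List.filter_filter]
        have e1 : mv.filter (fun p => !(p.1 == r1)) = mv := by
          refine List.filter_eq_self.mpr (fun q hq => ?_)
          have := (hmvlt q hq).2
          have hne3 : q.1 ≠ r1 := by omega
          simp [hne3]
        have e2 : ([(g', (PySem.Dict.mk L).getD r1 0)]).filter (fun p => !(p.1 == r1)) = [(g', (PySem.Dict.mk L).getD r1 0)] := by
          have hne3 : g' ≠ r1 := by omega
          simp [hne3]
        have e3 : L.filter (fun p => !(p.1 == r1) && !(PySem.Set.contains del p.1))
            = L.filter (fun p => !(PySem.Set.contains (PySem.Set.add del r1) p.1)) := by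
          refine List.filter_congr (fun p _ => ?_)
          rw [PySem.Set.add_of_not_mem hr1del]
          by_cases h1 : p.1 ∈ del <;> by_cases h2 : p.1 = r1 <;> simp [h1, h2]
        rw [e1, e2, e3]
        simp [List.append_assoc]
      have hBstep : pvLoopB (PySem.Dict.mk L) (r1 :: rs') asc g del mv
          = pvLoopB (PySem.Dict.mk L) rs' (pvNextGap asc g).2 (g' + 1) (PySem.Set.add del r1)
              (mv ++ [(g', (PySem.Dict.mk L).getD r1 0)]) := by
        simp only [pvLoopB]
        rw [← hg', if_neg (by omega)]
      rw [hBstep]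
      simp only [pvLoopA]
      rw [hrr1, hww, if_neg (by omega), hstate]
      refine ih fuel' (g' + 1) (pvNextGap asc g).2 (PySem.Set.add del r1)
        (mv ++ [(g', (PySem.Dict.mk L).getD r1 0)]) g' r1 ?_ ?_ ?_ ?_ ?_ ?_ ?_ ?_ ?_ ?_ ?_ ?_ ?_ ?_ ?_ ?_ ?_ ?_ ?_ ?_ ?_
      · simp at hfuel; omega
      · intro x hx
        rcases (PySem.Set.mem_add _ _ _).mp hx with h | h
        · exact ⟨by have := hdelge x h; omega, (hdel x h).2.1, (hdel x h).2.2⟩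
        · subst h
          exact ⟨le_refl _, hr1K, hr1mw⟩
      · intro h
        exfalso
        have : r1 ∈ PySem.Set.add del r1 := (PySem.Set.mem_add _ _ _).mpr (Or.inr rfl)
        rw [h] at this
        simp at this
      · exact fun _ => (PySem.Set.mem_add _ _ _).mpr (Or.inr rfl)
      · exact hgapp
      · exact hgapsub
      · exact fun k hk h0 hgk => hgapcov' k hk h0 (by omega)
      · omega
      · omega
      · omega
      · intro q hq
        rcases List.mem_append.mp hq with h | h
        · exact ⟨(hmvlt q h).1, by have := (hmvlt q h).2; omega⟩
        · simp at h
          subst h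
          exact ⟨by omega, by omega⟩
      · intro q hq
        rcases List.mem_append.mp hq with h | h
        · exact hmvnK q h
        · simp at h
          subst h
          exact hgapnK
      · rw [List.map_append, List.nodup_append]
        refine ⟨hmvnd, by simp, ?_⟩
        intro a ha b hb hab
        obtain ⟨q, hq, rfl⟩ := List.mem_map.mp ha
        simp at hb
        have := (hmvlt q hq).2
        omega
      · intro j h0 hlt
        by_cases hjg : j < g
        · rcases hcov j h0 hjg with h | h
          · exact Or.inl h
          · exact Or.inr (by rw [List.map_append]; exact List.mem_append_left _ h)
        · by_cases hjg' : j < g'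
          · exact Or.inl (hgapcov j (by omega) hjg')
          · have : j = g' := by omega
            subst this
            exact Or.inr (by rw [List.map_append]; exact List.mem_append_right _ (by simp))
      · intro _
        rw [show g' + 1 - 1 = g' by omega, List.map_append]
        exact List.mem_append_right _ (by simp)
      · exact fun _ => by omega
      · constructor
        · intro h; simp at h
        · intro h
          exfalso
          have : r1 ∈ PySem.Set.add del r1 := (PySem.Set.mem_add _ _ _).mpr (Or.inr rfl)
          rw [h] at this
          simp at this
      · intro h; simp at h
      · exact hrsp'
      · intro k
        constructor
        · intro hk
          obtain ⟨h1, h2, h3, h4⟩ := (hrsmem k).mp (List.mem_cons_of_mem r1 hk)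
          have hklt : k < r1 := hrall k hk
          refine ⟨h1, h2, by omega, fun hk2 => ?_⟩
          rcases (PySem.Set.mem_add _ _ _).mp hk2 with h | h
          · exact h4 h
          · omega
        · rintro ⟨h1, h2, h3, h4⟩
          have hknd : k ∉ del := fun hk2 => h4 ((PySem.Set.mem_add _ _ _).mpr (Or.inl hk2))
          have hknr : k ≠ r1 := fun hk2 => h4 ((PySem.Set.mem_add _ _ _).mpr (Or.inr hk2))
          have : k ∈ r1 :: rs' := (hrsmem k).mpr ⟨h1, h2, by omega, hknd⟩
          rcases List.mem_cons.mp this with h | h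
          · exact absurd h hknr
          · exact h
      · exact Or.inr (by simp)

theorem pv_assemble (xs mv : List (Int × Int)) (hxs : (xs.map Prod.fst).Nodup)
    (hmv : (mv.map Prod.fst).Nodup) (hfresh : ∀ q ∈ mv, q.1 ∉ xs.map Prod.fst) :
    ((PySem.Dict.ofList xs).update mv).items = xs ++ mv := by
  have h1 : (PySem.Dict.ofList xs).items = xs := by
    have h := PySem.Dict.items_foldl_insert_fresh xs Prod.fst Prod.snd
      (PySem.Dict.empty : PySem.Dict Int Int) (by simp) hxs
    show ((xs.foldl (fun acc p => acc.insert p.1 p.2) PySem.Dict.empty)).items = xs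
    simpa using h
  have hfresh' : ∀ q ∈ mv, (PySem.Dict.ofList xs).contains q.1 = false := by
    intro q hq
    refine pv_bfalse _ (fun hcc => ?_)
    have hkeys : (PySem.Dict.ofList xs).keys = xs.map Prod.fst := by
      simp only [PySem.Dict.keys, h1]
    have := (PySem.Dict.contains_iff_mem_keys _ _).mp hcc
    rw [hkeys] at this
    exact hfresh q hq this
  have h2 := PySem.Dict.items_foldl_insert_fresh mv Prod.fst Prod.snd (PySem.Dict.ofList xs) hfresh' hmv
  show ((mv.foldl (fun acc p => acc.insert p.1 p.2) (PySem.Dict.ofList xs))).items = xs ++ mv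
  rw [h1] at h2
  simpa using h2

theorem pv_sorted_lt (xs : List Int) (h : xs.Nodup) :
    (PySem.List.sorted xs (fun k => k)).Pairwise (· < ·) := by
  have h1 := PySem.List.sorted_pairwise xs (fun k => k)
  have h2 : (PySem.List.sorted xs (fun k => k)).Nodup :=
    ((PySem.List.sorted_perm xs (fun k => k) false).nodup_iff).mpr h
  exact (h1.and h2).imp (fun hab => lt_of_le_of_ne hab.1 hab.2)

theorem pv_sorted_gt (xs : List Int) (h : xs.Nodup) :
    (PySem.List.sorted xs (fun k => k) true).Pairwise (· > ·) := by
  have h1 := PySem.List.sorted_pairwise_rev xs (fun k => k)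
  have h2 : (PySem.List.sorted xs (fun k => k) true).Nodup :=
    ((PySem.List.sorted_perm xs (fun k => k) true).nodup_iff).mpr h
  exact (h1.and h2).imp (fun hab => lt_of_le_of_ne hab.1 (fun he => hab.2 he.symm))

-- ===== VERDICT (by name: the statement is the Claim_ definition above) =====
theorem compact_data_spec : Claim_equal_compact_data := by
  intro data max_write hdom hpre
  obtain ⟨hK, p0, hp0, hp0le⟩ := hpre
  unfold Spec_compact_data
  show (pvLoopA (PySem.Dict.mk data) 0 max_write (data.length + 1)).items = _
  set asc := PySem.List.sorted (((PySem.Dict.mk data).keys).filter (fun k => decide (0 ≤ k))) (fun k => k) with hasc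
  set readers := PySem.List.sorted (((PySem.Dict.mk data).keys).filter (fun k => decide (k ≤ max_write))) (fun k => k) true with hreaders
  have hkeys : (PySem.Dict.mk data).keys = data.map Prod.fst := by simp [PySem.Dict.keys_mk]
  have hfnd1 : (((PySem.Dict.mk data).keys).filter (fun k => decide (0 ≤ k))).Nodup := by
    rw [hkeys]; exact hK.filter _
  have hfnd2 : (((PySem.Dict.mk data).keys).filter (fun k => decide (k ≤ max_write))).Nodup := by
    rw [hkeys]; exact hK.filter _
  have hlen : readers.length ≤ data.length := by
    rw [hreaders]
    calc (PySem.List.sorted (((PySem.Dict.mk data).keys).filter (fun k => decide (k ≤ max_write))) (fun k => k) true).length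
        = (((PySem.Dict.mk data).keys).filter (fun k => decide (k ≤ max_write))).length :=
          (PySem.List.sorted_perm _ _ _).length_eq
      _ ≤ ((PySem.Dict.mk data).keys).length := List.length_filter_le _ _
      _ = data.length := by rw [hkeys, List.length_map]
  obtain ⟨hfreshm, hndm, heq⟩ :=
    pv_master data max_write hK readers (data.length + 1) 0 asc PySem.Set.empty [] 0 max_write
      (by omega)
      (fun x hx => absurd hx (by simp [PySem.Set.empty]))
      (fun _ => rfl)
      (fun h => absurd rfl h)
      (pv_sorted_lt _ hfnd1)
      (by
        intro k hk
        rw [hasc, PySem.List.mem_sorted] at hk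
        obtain ⟨h1, h2⟩ := List.mem_filter.mp hk
        rw [hkeys] at h1
        exact ⟨h1, by simpa using h2⟩)
      (by
        intro k hk h0 _
        rw [hasc, PySem.List.mem_sorted]
        refine List.mem_filter.mpr ⟨by rw [hkeys]; exact hk, by simpa using h0⟩)
      (le_refl 0)
      (le_refl 0)
      (le_refl 0)
      (fun q hq => absurd hq (List.not_mem_nil))
      (fun q hq => absurd hq (List.not_mem_nil))
      List.nodup_nil
      (fun j h1 h2 => by omega)
      (fun h => absurd rfl h)
      (fun h => absurd rfl h)
      (iff_of_true rfl rfl)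
      (fun _ => rfl)
      (pv_sorted_gt _ hfnd2)
      (by
        intro k
        constructor
        · intro hk
          rw [hreaders, PySem.List.mem_sorted] at hk
          obtain ⟨h1, h2⟩ := List.mem_filter.mp hk
          rw [hkeys] at h1
          exact ⟨h1, by simpa using h2, by simpa using h2, by simp [PySem.Set.empty]⟩
        · rintro ⟨h1, h2, h3, h4⟩
          rw [hreaders, PySem.List.mem_sorted]
          exact List.mem_filter.mpr ⟨by rw [hkeys]; exact h1, by simpa using h2⟩)
      (by
        refine Or.inl (List.ne_nil_of_mem (a := p0.1) ?_)
        rw [hreaders, PySem.List.mem_sorted]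
        refine List.mem_filter.mpr ⟨by rw [hkeys]; exact List.mem_map_of_mem hp0, by simpa using hp0le⟩)
  have hinit : data.filter (fun p => !(PySem.Set.contains PySem.Set.empty p.1)) ++ ([] : List (Int × Int)) = data := by
    simp [PySem.Set.empty]
  rw [hinit] at heq
  rw [heq]
  set res := pvLoopB (PySem.Dict.mk data) readers asc 0 PySem.Set.empty [] with hres
  show _ = ((PySem.Dict.ofList (data.filter (fun p => !(PySem.Set.contains res.1 p.1)))).update res.2).items
  rw [pv_assemble (data.filter (fun p => !(PySem.Set.contains res.1 p.1))) res.2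
    (hK.sublist ((List.filter_sublist).map Prod.fst)) hndm
    (fun q hq hmem => by
      obtain ⟨p, hp, hp1⟩ := List.mem_map.mp hmem
      exact hfreshm q hq (hp1 ▸ List.mem_map_of_mem (List.mem_of_mem_filter hp)))]
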